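-- pv_equiv track=rewrite | github.com/jordan2doyle1/Exp-2024-Padraig | code/selection/selector.py | get_latest_version
-- ===== SOURCE A (Python) =====
-- def get_latest_version(last_updated, versions):
--     latest_version = None
--     for package_version in versions.values():
--         if package_version["added"] == last_updated:
--             latest_version = package_version
--             break
--         elif latest_version is None or latest_version["added"] < package_version["added"]:
--             latest_version = package_version
--
--     return latest_version
-- ===== SOURCE B (Python) =====
-- def get_latest_version(last_updated, versions):
--     vals = list(versions.values())
--     match = next((pv for pv in vals if pv["added"] == last_updated), None)
--     if match is not None:
--         return match
--     return max(vals, key=lambda pv: pv["added"], default=None)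
-- ===== Notes on version B (the rewrite author's own statement) =====
-- stated objective: idiomatic
-- what changed: Replaces the fused search+running-max loop with break by two sequential passes: an early-exit generator search for an exact 'added' match, then the builtin max(key=..., default=None) reduction (first maximal element reproduces A's strict-< keep-first tie behaviour).
import Mathlib
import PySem

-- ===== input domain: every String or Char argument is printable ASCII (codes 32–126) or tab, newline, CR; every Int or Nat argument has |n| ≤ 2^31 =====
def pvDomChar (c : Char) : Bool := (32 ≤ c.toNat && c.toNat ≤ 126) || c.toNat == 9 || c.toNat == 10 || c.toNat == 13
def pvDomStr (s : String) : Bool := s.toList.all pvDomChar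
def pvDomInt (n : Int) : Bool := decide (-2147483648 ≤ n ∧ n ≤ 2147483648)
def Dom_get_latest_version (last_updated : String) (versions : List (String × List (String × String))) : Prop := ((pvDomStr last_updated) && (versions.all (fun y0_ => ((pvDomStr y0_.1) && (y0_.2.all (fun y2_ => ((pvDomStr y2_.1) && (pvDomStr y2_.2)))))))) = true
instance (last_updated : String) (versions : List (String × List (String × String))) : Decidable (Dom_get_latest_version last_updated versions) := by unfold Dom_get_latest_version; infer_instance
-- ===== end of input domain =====

-- B replaces A's fused search+running-max loop (with break) by two passes: a find? search, then the builtin first-maximal max reduction; same cost, plainer decomposition. Equivalence of return values on Pre_ (inputs where A raises no KeyError).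

-- ===== PORT A =====
-- pv["added"]; both Pythons access the value dicts only through this lookup
def pvAdded (pv : List (String × String)) : Option String :=
  (PySem.Dict.mk pv).get? "added"

-- the for-loop of A: accumulator `latest`, break on an exact match of "added"
-- (`(pvAdded pv).getD ""` stands for pv["added"]; Pre_ guarantees the key exists on every value the loop reaches)
def getLatestLoop (last_updated : String) (latest : Option (List (String × String))) :
    List (List (String × String)) → Option (List (String × String))
  | [] => latest
  | pv :: rest =>
    if (pvAdded pv).getD "" == last_updated then some pv
    else
      match latest with
      | none => getLatestLoop last_updated (some pv) rest
      | some l =>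
        if (pvAdded l).getD "" < (pvAdded pv).getD "" then
          getLatestLoop last_updated (some pv) rest
        else getLatestLoop last_updated (some l) rest

def get_latest_version (last_updated : String) (versions : List (String × List (String × String))) : Option (List (String × String)) :=
  getLatestLoop last_updated none ((PySem.Dict.ofList versions).values)

-- ===== PORT B =====
def get_latest_version_alt (last_updated : String) (versions : List (String × List (String × String))) : Option (List (String × String)) :=
  let vals := (PySem.Dict.ofList versions).values
  match vals.find? (fun pv => (pvAdded pv).getD "" == last_updated) with
  | some pv => some pv
  | none => PySem.List.max? vals (fun pv => (pvAdded pv).getD "")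

-- ===== PRECONDITION & SPEC =====
-- Pre_ excludes exactly the inputs on which Python A raises KeyError: a value dict without the
-- key "added" occurring before the first value whose "added" equals last_updated (or anywhere,
-- when there is no such match) — the loop reaches it and pv["added"] raises. (B raises there too.)
def Pre_get_latest_version (last_updated : String) (versions : List (String × List (String × String))) : Prop :=
  ∀ pv ∈ ((PySem.Dict.ofList versions).values).takeWhile
      (fun pv => !(pvAdded pv == some last_updated)),
    (PySem.Dict.mk pv).contains "added" = true
instance (last_updated : String) (versions : List (String × List (String × String))) : Decidable (Pre_get_latest_version last_updated versions) := by unfold Pre_get_latest_version; infer_instance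

def pvWitness_get_latest_version : String × (List (String × List (String × String))) :=
  ("x", [("a", [("added", "w")]), ("b", [("added", "x")]), ("c", [])])


def Spec_get_latest_version (last_updated : String) (versions : List (String × List (String × String))) (out : Option (List (String × String))) : Prop := out = get_latest_version_alt last_updated versions
instance (last_updated : String) (versions : List (String × List (String × String))) (out : Option (List (String × String))) : Decidable (Spec_get_latest_version last_updated versions out) := by unfold Spec_get_latest_version; infer_instance

-- ===== CLAIM (what is proved, stated in full; the proofs are below) =====
def Claim_equal_get_latest_version : Prop := ∀ (last_updated : String) (versions : List (String × List (String × String))), Dom_get_latest_version last_updated versions → Pre_get_latest_version last_updated versions → Spec_get_latest_version last_updated versions (get_latest_version last_updated versions)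

-- ===== LEMMAS AND PROOFS =====
-- A's loop, from any accumulator, is: first match if any, else the keep-first running max from that accumulator.
theorem getLatestLoop_eq (last_updated : String) (vs : List (List (String × String))) :
    ∀ acc : Option (List (String × String)),
      getLatestLoop last_updated acc vs =
        match vs.find? (fun pv => (pvAdded pv).getD "" == last_updated) with
        | some pv => some pv
        | none =>
            vs.foldl
              (fun a x =>
                match a with
                | none => some x
                | some m => if (pvAdded m).getD "" < (pvAdded x).getD "" then some x else some m)
              acc := by
  induction vs with
  | nil => intro acc; simp [getLatestLoop]
  | cons pv rest ih =>
    intro acc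
    by_cases h : ((pvAdded pv).getD "" == last_updated) = true
    · simp [getLatestLoop, h, List.find?]
    · cases acc with
      | none => simp [getLatestLoop, h, List.find?, ih]
      | some l =>
        by_cases hlt : ((pvAdded l).getD "").toList < ((pvAdded pv).getD "").toList
        · simp [getLatestLoop, h, hlt, List.find?, ih]
        · simp [getLatestLoop, h, hlt, List.find?, ih]

-- ===== VERDICT (by name: the statement is the Claim_ definition above) =====
theorem get_latest_version_spec : Claim_equal_get_latest_version := by
  intro last_updated versions _ _
  unfold Spec_get_latest_version get_latest_version get_latest_version_alt
  rw [getLatestLoop_eq]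
  cases hf : List.find? (fun pv => (pvAdded pv).getD "" == last_updated)
      (PySem.Dict.ofList versions).values with
  | none =>
    simp only [hf, PySem.List.max?]
    congr 1
    funext a x
    cases a <;> simp
  | some pv => simp [hf]
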